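-- pv_equiv track=rewrite | github.com/lakshmick96/python-practice-book-chapter2 | problem16.py | extsort
-- ===== SOURCE A (Python) =====
-- def extsort(a):
--     b = []
--     c = []
--     e = []
--     f = []
--     for i in a:
--         x = i.split('.')
--         b.append(x)
--     for i in b:
--         y = i[::-1]
--         c.append(y)
--     d = sorted(c)
--     for i in d:
--         z = i[::-1]
--         e.append(z)
--     for i in e:
--         x = '.'.join(i)
--         f.append(x)
--     return f
-- ===== SOURCE B (Python) =====
-- def extsort(a):
--     # Stable insertion sort maintaining two parallel sorted lists (keys and
--     # strings); each string is placed after every earlier string whose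
--     # reversed dot-split key is <= its own. No sorted() call, no
--     # decorate/undecorate passes, no re-joining of components.
--     out = []
--     keys = []
--     for s in a:
--         k = s.split('.')[::-1]
--         i = 0
--         while i < len(keys) and not (k < keys[i]):
--             i += 1
--         keys.insert(i, k)
--         out.insert(i, s)
--     return out
-- ===== Notes on version B (the rewrite author's own statement) =====
-- stated objective: alternative
-- what changed: Replaced the four-pass decorate/sorted()/undecorate pipeline (split, reverse, library sort of the reversed component lists, reverse back, re-join every string) by an explicit stable insertion sort that places each original string into two parallel sorted lists (reversed-split keys and strings) and never reconstructs a string; it trades the library O(n log n) sort for an O(n^2) hand insertion sort of similar practical cost on small lists.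
import Mathlib
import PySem

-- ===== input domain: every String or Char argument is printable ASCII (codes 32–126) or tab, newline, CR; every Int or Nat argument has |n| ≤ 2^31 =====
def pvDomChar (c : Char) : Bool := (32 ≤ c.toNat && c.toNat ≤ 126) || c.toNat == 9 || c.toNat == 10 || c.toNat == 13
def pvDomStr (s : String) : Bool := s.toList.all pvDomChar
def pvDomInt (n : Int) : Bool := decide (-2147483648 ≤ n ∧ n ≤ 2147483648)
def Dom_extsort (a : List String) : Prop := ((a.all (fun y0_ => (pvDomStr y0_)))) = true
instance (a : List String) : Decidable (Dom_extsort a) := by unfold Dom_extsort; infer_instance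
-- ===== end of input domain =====

-- B replaces A's four-pass decorate/sorted()/undecorate pipeline by an explicit stable
-- insertion sort over two parallel lists (keys and originals) — alternative algorithm.

-- ===== PORT A =====
-- i.split('.'): sep "." is nonempty, so Str.split? is always `some`; .getD [] only totalizes.
-- i[::-1]: step -1 ≠ 0, so List.slice? is always `some`; .getD [] only totalizes.
def extsort (a : List String) : List String :=
  let b := a.foldl (fun acc i => acc ++ [(PySem.Str.split? i ".").getD []]) ([] : List (List String))
  let c := b.foldl (fun acc i => acc ++ [(PySem.List.slice? i none none (-1)).getD []]) ([] : List (List String))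
  let d := PySem.List.sorted c (fun x => x) false
  let e := d.foldl (fun acc i => acc ++ [(PySem.List.slice? i none none (-1)).getD []]) ([] : List (List String))
  let f := e.foldl (fun acc i => acc ++ [PySem.Str.join "." i]) ([] : List String)
  f

-- ===== PORT B =====
-- k = s.split('.')[::-1]
def bKey (s : String) : List String :=
  (PySem.List.slice? ((PySem.Str.split? s ".").getD []) none none (-1)).getD []

-- the while loop: i = 0; while i < len(keys) and not (k < keys[i]): i += 1
def bFind (k : List String) (keys : List (List String)) : Nat :=
  match keys with
  | [] => 0
  | y :: ys => if k < y then 0 else bFind k ys + 1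

-- the for loop over a, maintaining the parallel lists (keys, out); returns out
def extsort_alt (a : List String) : List String :=
  (a.foldl
    (fun (st : List (List String) × List String) s =>
      let k := bKey s
      let i := bFind k st.1
      (PySem.List.insert st.1 (Int.ofNat i) k, PySem.List.insert st.2 (Int.ofNat i) s))
    (([], []) : List (List String) × List String)).2

-- ===== PRECONDITION & SPEC =====
def Spec_extsort (a : List String) (out : List String) : Prop := out = extsort_alt a
instance (a : List String) (out : List String) : Decidable (Spec_extsort a out) := by unfold Spec_extsort; infer_instance

-- ===== CLAIM (what is proved, stated in full; the proofs are below) =====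
def Claim_equal_extsort : Prop := ∀ (a : List String), Dom_extsort a → Spec_extsort a (extsort a)

-- ===== LEMMAS AND PROOFS =====

-- intercalate glues two adjacent pieces separated by sep into one
lemma intercalate_append_pair (sep x y : List Char) (A : List (List Char)) :
    List.intercalate sep (A ++ [x, y]) = List.intercalate sep (A ++ [x ++ sep ++ y]) := by
  induction A with
  | nil => simp [List.intercalate, List.intersperse]
  | cons a A ih =>
      cases A with
      | nil => simp [List.intercalate, List.intersperse]
      | cons b B =>
          simp only [List.cons_append, List.intercalate, List.intersperse_cons₂,
            List.flatten_cons] at *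
          simp [ih]

-- invariant of splitOn.go: joining the produced pieces restores acc.reverse ++ [cur.reverse ++ l]
lemma splitOn_go_join (sep : List Char) (hsep : sep ≠ []) :
    ∀ (fuel : Nat) (l cur : List Char) (acc : List (List Char)), l.length < fuel →
      List.intercalate sep (PySem.Chars.splitOn.go sep fuel l cur acc)
        = List.intercalate sep (acc.reverse ++ [cur.reverse ++ l]) := by
  intro fuel
  induction fuel with
  | zero => intro l cur acc h; omega
  | succ fuel ih =>
      intro l cur acc h
      cases l with
      | nil => simp [PySem.Chars.splitOn.go]
      | cons c rest =>
          rw [PySem.Chars.splitOn.go]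
          by_cases hp : sep.isPrefixOf (c :: rest) = true
          · simp only [hp, if_pos]
            have hpre : sep <+: (c :: rest) := List.isPrefixOf_iff_prefix.mp hp
            obtain ⟨t, ht⟩ := hpre
            have hslen : 0 < sep.length := List.length_pos_iff.mpr hsep
            have hdrop : (c :: rest).drop sep.length = t := by
              rw [← ht, List.drop_left]
            have hlt : ((c :: rest).drop sep.length).length < fuel := by
              rw [hdrop]
              have h2 := congrArg List.length ht
              simp at h2 h
              omega
            rw [ih _ [] _ hlt]
            simp only [List.reverse_cons, List.reverse_nil, List.nil_append, List.append_assoc]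
            rw [hdrop]
            rw [show acc.reverse ++ ([cur.reverse] ++ [t]) = acc.reverse ++ [cur.reverse, t] from rfl,
              intercalate_append_pair, ← ht]
            simp
          · simp only [hp, if_neg, Bool.not_eq_true]
            have hlt : rest.length < fuel := by simp at h; omega
            rw [ih _ _ _ hlt]
            simp

-- '.'.join(s.split('.')) == s on the char-list level
lemma join_splitOn_dot (cs : List Char) :
    List.intercalate ['.'] (PySem.Chars.splitOn cs ['.']) = cs := by
  unfold PySem.Chars.splitOn
  rw [splitOn_go_join ['.'] (by simp) _ _ _ _ (by omega)]
  simp [List.intercalate]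

-- roundtrip on the String level, with the exact totalized form the ports use
lemma join_split_dot (s : String) :
    PySem.Str.join "." ((PySem.Str.split? s ".").getD []) = s := by
  unfold PySem.Str.split? PySem.Chars.split? PySem.Str.join PySem.Chars.join
  rw [if_neg (by decide)]
  simp only [Option.map_some, Option.getD_some, List.map_map]
  have hmap : (PySem.Chars.splitOn s.toList ".".toList).map (String.toList ∘ String.ofList)
      = PySem.Chars.splitOn s.toList ".".toList := by
    simp [Function.comp_def]
  rw [hmap]
  have : ".".toList = ['.'] := rfl
  rw [this, join_splitOn_dot]
  exact String.ofList_toList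

-- map of a key commutes with insertBy under that key
lemma map_key_insertBy {α κ : Type} [LT κ] [DecidableLT κ] (k : α → κ) (x : α) (acc : List α) :
    (PySem.List.insertBy (fun a b => decide (k a < k b)) x acc).map k
      = PySem.List.insertBy (fun a b => decide (a < b)) (k x) (acc.map k) := by
  induction acc with
  | nil => simp [PySem.List.insertBy]
  | cons y ys ih =>
      by_cases hb : k x < k y
      · simp [PySem.List.insertBy, hb]
      · simp [PySem.List.insertBy, hb, ih]

-- sorting the mapped keys with the identity = mapping the key over the key-sorted list
lemma sorted_map_key {α κ : Type} [LT κ] [DecidableLT κ] (k : α → κ) (xs : List α) :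
    PySem.List.sorted (xs.map k) (fun x => x) false
      = (PySem.List.sorted xs k false).map k := by
  rw [PySem.List.sorted_eq_foldl_insertBy, PySem.List.sorted_eq_foldl_insertBy]
  suffices h : ∀ (acc : List α),
      (xs.map k).foldl (fun acc y => PySem.List.insertBy (fun a b => decide (a < b)) y acc) (acc.map k)
        = (xs.foldl (fun acc x => PySem.List.insertBy (fun a b => decide (k a < k b)) x acc) acc).map k by
    simpa using h []
  induction xs with
  | nil => intro acc; simp
  | cons x xs ih =>
      intro acc
      simp only [List.map_cons, List.foldl_cons]
      rw [← map_key_insertBy, ih]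

-- A's value is the key-based stable sort of the originals
lemma extsort_eq_sorted (a : List String) :
    extsort a = PySem.List.sorted a bKey false := by
  unfold extsort
  simp only [PySem.List.foldl_append_singleton_eq_map, PySem.List.slice?_none_none_neg_one,
    Option.getD_some, List.nil_append, List.map_map]
  rw [show (List.reverse ∘ fun x => (PySem.Str.split? x ".").getD [])
        = (fun s => ((PySem.Str.split? s ".").getD []).reverse) from rfl]
  have hkey : (fun s => ((PySem.Str.split? s ".").getD []).reverse) = bKey := by
    funext s
    simp [bKey, PySem.List.slice?_none_none_neg_one]
  rw [hkey, sorted_map_key]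
  simp only [List.map_map]
  have hfun : ((PySem.Str.join "." ∘ List.reverse) ∘ bKey) = id := by
    funext s
    simp only [Function.comp_apply, bKey, PySem.List.slice?_none_none_neg_one,
      Option.getD_some, List.reverse_reverse, join_split_dot, id_eq]
  rw [hfun, List.map_id]

-- the while-loop index never passes the end of the list
lemma bFind_le (k : List String) (keys : List (List String)) : bFind k keys ≤ keys.length := by
  induction keys with
  | nil => simp [bFind]
  | cons y ys ih =>
      by_cases hb : k < y
      · simp [bFind, hb]
      · simp [bFind, hb]; omega

-- inserting at the scanned index = one step of the stable insertion sort (string side)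
lemma insert_bFind_out (s : String) (out : List String) :
    PySem.List.insert out (Int.ofNat (bFind (bKey s) (out.map bKey))) s
      = PySem.List.insertBy (fun a b => decide (bKey a < bKey b)) s out := by
  induction out with
  | nil => simp [bFind, PySem.List.insertBy, PySem.List.insert_zero]
  | cons y ys ih =>
      by_cases hb : bKey s < bKey y
      · simp [bFind, hb, PySem.List.insertBy, PySem.List.insert_zero]
      · have hle : bFind (bKey s) (ys.map bKey) ≤ ys.length := by
          have := bFind_le (bKey s) (ys.map bKey); simpa using this
        simp only [List.map_cons, bFind, hb, decide_false, Bool.false_eq_true, if_false,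
          PySem.List.insertBy, ← ih]
        simp only [Int.ofNat_eq_natCast]
        rw [PySem.List.insert_natCast _ _ _ (by rw [List.length_cons]; omega),
          PySem.List.insert_natCast _ _ _ (by simpa using hle)]
        simp [List.take_succ_cons, List.drop_succ_cons]
  
-- inserting at the scanned index = one step of the stable insertion sort (key side)
lemma insert_bFind_key (K : List String) (keys : List (List String)) :
    PySem.List.insert keys (Int.ofNat (bFind K keys)) K
      = PySem.List.insertBy (fun a b => decide (a < b)) K keys := by
  induction keys with
  | nil => simp [bFind, PySem.List.insertBy, PySem.List.insert_zero]
  | cons y ys ih =>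
      by_cases hb : K < y
      · simp [bFind, hb, PySem.List.insertBy, PySem.List.insert_zero]
      · have hle := bFind_le K ys
        simp only [bFind, hb, decide_false, Bool.false_eq_true, if_false,
          PySem.List.insertBy, ← ih]
        simp only [Int.ofNat_eq_natCast]
        rw [PySem.List.insert_natCast _ _ _ (by rw [List.length_cons]; omega),
          PySem.List.insert_natCast _ _ _ (by simpa using hle)]
        simp [List.take_succ_cons, List.drop_succ_cons]

-- loop invariant: the key list is always the key-image of the output list,
-- and the output list evolves exactly as the insertBy fold
lemma alt_loop (xs : List String) : ∀ (out : List String),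
    xs.foldl
      (fun (st : List (List String) × List String) s =>
        let k := bKey s
        let i := bFind k st.1
        (PySem.List.insert st.1 (Int.ofNat i) k, PySem.List.insert st.2 (Int.ofNat i) s))
      (out.map bKey, out)
      = ((xs.foldl (fun acc x => PySem.List.insertBy (fun a b => decide (bKey a < bKey b)) x acc) out).map bKey,
          xs.foldl (fun acc x => PySem.List.insertBy (fun a b => decide (bKey a < bKey b)) x acc) out) := by
  induction xs with
  | nil => intro out; simp
  | cons x xs ih =>
      intro out
      simp only [List.foldl_cons]
      rw [show (PySem.List.insert (out.map bKey) (Int.ofNat (bFind (bKey x) (out.map bKey))) (bKey x),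
              PySem.List.insert out (Int.ofNat (bFind (bKey x) (out.map bKey))) x)
            = ((PySem.List.insertBy (fun a b => decide (bKey a < bKey b)) x out).map bKey,
              PySem.List.insertBy (fun a b => decide (bKey a < bKey b)) x out) by
            rw [insert_bFind_out, insert_bFind_key, map_key_insertBy]]
      exact ih _

-- B's value is the same key-based stable sort
lemma extsort_alt_eq_sorted (a : List String) :
    extsort_alt a = PySem.List.sorted a bKey false := by
  unfold extsort_alt
  have h := alt_loop a []
  simp only [List.map_nil] at h
  rw [h, PySem.List.sorted_eq_foldl_insertBy]

-- ===== VERDICT (by name: the statement is the Claim_ definition above) =====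
theorem extsort_spec : Claim_equal_extsort := by
  intro a _
  unfold Spec_extsort
  rw [extsort_eq_sorted, extsort_alt_eq_sorted]
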